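-- pv_equiv track=rewrite | github.com/sportne/engllm-chat | src/engllm_chat/probe_openai_api.py | _pick_text_model
-- ===== SOURCE A (Python) =====
-- from collections.abc import Callable, Sequence
--
-- def _pick_text_model(model_ids: Sequence[str]) -> str | None:
--     if not model_ids:
--         return None
--
--     preferred_terms = ("gpt", "chat", "instruct", "llama", "qwen", "mistral")
--     excluded_terms = (
--         "embed",
--         "embedding",
--         "moderation",
--         "tts",
--         "whisper",
--         "transcribe",
--         "image",
--         "dall",
--     )
--     for model_id in model_ids:
--         lowered = model_id.lower()
--         if any(term in lowered for term in preferred_terms) and not any(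
--             term in lowered for term in excluded_terms
--         ):
--             return model_id
--     for model_id in model_ids:
--         lowered = model_id.lower()
--         if not any(term in lowered for term in excluded_terms):
--             return model_id
--     return None
-- ===== SOURCE B (Python) =====
-- def _pick_text_model(model_ids):
--     preferred_terms = ("gpt", "chat", "instruct", "llama", "qwen", "mistral")
--     excluded_terms = (
--         "embed",
--         "embedding",
--         "moderation",
--         "tts",
--         "whisper",
--         "transcribe",
--         "image",
--         "dall",
--     )
--     fallback = None
--     for model_id in model_ids:
--         lowered = model_id.lower()
--         if any(term in lowered for term in excluded_terms):
--             continue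
--         if any(term in lowered for term in preferred_terms):
--             return model_id
--         if fallback is None:
--             fallback = model_id
--     return fallback
-- ===== Notes on version B (the rewrite author's own statement) =====
-- stated objective: simpler
-- what changed: Replaces A's two sequential scans (preferred-and-surviving, then surviving) by a single pass that returns the first preferred surviving id immediately and remembers the first surviving id as a fallback returned after the loop.
import Mathlib
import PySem

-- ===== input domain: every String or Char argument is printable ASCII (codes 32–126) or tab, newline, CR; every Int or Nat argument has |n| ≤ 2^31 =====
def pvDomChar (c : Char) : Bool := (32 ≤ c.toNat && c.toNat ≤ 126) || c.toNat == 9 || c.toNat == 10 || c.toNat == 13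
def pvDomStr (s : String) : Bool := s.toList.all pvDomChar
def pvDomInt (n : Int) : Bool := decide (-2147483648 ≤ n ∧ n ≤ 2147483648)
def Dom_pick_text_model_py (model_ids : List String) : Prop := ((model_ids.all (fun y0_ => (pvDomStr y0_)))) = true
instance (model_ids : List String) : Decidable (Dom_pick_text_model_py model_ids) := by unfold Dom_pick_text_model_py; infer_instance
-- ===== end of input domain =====

-- B replaces A's two sequential scans with one pass keeping a first-surviving fallback; objective: simpler.

-- ===== PORT A =====
def pvPreferredTerms : List String := ["gpt", "chat", "instruct", "llama", "qwen", "mistral"]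
def pvExcludedTerms : List String :=
  ["embed", "embedding", "moderation", "tts", "whisper", "transcribe", "image", "dall"]

-- any(term in lowered for term in terms)
def pvAnyIn (terms : List String) (lowered : String) : Bool :=
  terms.any (fun term => PySem.Str.isIn term lowered)

-- A's first loop: first id matching a preferred term and no excluded term
def pickLoop1 : List String → Option String
  | [] => none
  | model_id :: rest =>
    let lowered := PySem.Str.lower model_id
    if pvAnyIn pvPreferredTerms lowered && !pvAnyIn pvExcludedTerms lowered then some model_id
    else pickLoop1 rest

-- A's second loop: first id with no excluded term
def pickLoop2 : List String → Option String
  | [] => none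
  | model_id :: rest =>
    let lowered := PySem.Str.lower model_id
    if !pvAnyIn pvExcludedTerms lowered then some model_id
    else pickLoop2 rest

def pick_text_model_py (model_ids : List String) : Option String :=
  if model_ids = [] then none
  else
    match pickLoop1 model_ids with
    | some m => some m
    | none =>
      match pickLoop2 model_ids with
      | some m => some m
      | none => none

-- ===== PORT B =====
-- single pass carrying the fallback (first surviving, non-preferred id seen so far)
def pickGo : List String → Option String → Option String
  | [], fallback => fallback
  | model_id :: rest, fallback =>
    let lowered := PySem.Str.lower model_id
    if pvAnyIn pvExcludedTerms lowered then pickGo rest fallback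
    else if pvAnyIn pvPreferredTerms lowered then some model_id
    else pickGo rest (if fallback = none then some model_id else fallback)

def pick_text_model_py_alt (model_ids : List String) : Option String :=
  pickGo model_ids none

-- ===== PRECONDITION & SPEC =====
def Spec_pick_text_model_py (model_ids : List String) (out : Option String) : Prop := out = pick_text_model_py_alt model_ids
instance (model_ids : List String) (out : Option String) : Decidable (Spec_pick_text_model_py model_ids out) := by unfold Spec_pick_text_model_py; infer_instance

-- ===== CLAIM (what is proved, stated in full; the proofs are below) =====
def Claim_equal_pick_text_model_py : Prop := ∀ (model_ids : List String), Dom_pick_text_model_py model_ids → Spec_pick_text_model_py model_ids (pick_text_model_py model_ids)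

-- ===== LEMMAS AND PROOFS =====

-- The one-pass loop equals: first preferred-surviving id, else the pending fallback, else first surviving id.
theorem pickGo_eq (xs : List String) :
    ∀ fallback : Option String,
      pickGo xs fallback = ((pickLoop1 xs).or (fallback.or (pickLoop2 xs))) := by
  induction xs with
  | nil => intro fb; cases fb <;> simp [pickGo, pickLoop1, pickLoop2]
  | cons m rest ih =>
    intro fb
    simp only [pickGo, pickLoop1, pickLoop2]
    by_cases hex : pvAnyIn pvExcludedTerms (PySem.Str.lower m) = true
    · simp [hex, ih]
    · simp only [Bool.not_eq_true] at hex
      by_cases hpref : pvAnyIn pvPreferredTerms (PySem.Str.lower m) = true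
      · simp [hex, hpref]
      · simp only [Bool.not_eq_true] at hpref
        cases fb <;> simp [hex, hpref, ih]

-- ===== VERDICT (by name: the statement is the Claim_ definition above) =====
theorem pick_text_model_py_spec : Claim_equal_pick_text_model_py := by
  intro model_ids _
  unfold Spec_pick_text_model_py pick_text_model_py pick_text_model_py_alt
  rw [pickGo_eq]
  cases h : model_ids with
  | nil => simp [pickLoop1, pickLoop2]
  | cons m rest =>
    simp only [if_neg (List.cons_ne_nil m rest)]
    cases pickLoop1 (m :: rest) <;> cases pickLoop2 (m :: rest) <;> simp
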